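-- pv_equiv track=rewrite | github.com/kyrillosShark/AutoDeveloper | helpers.py | get_main_file
-- ===== SOURCE A (Python) =====
-- def get_main_file(file_paths):
--     """
--     Determines the main file to execute based on naming conventions.
--     """
--     # Priority 1: main.html
--     for file_name, path in file_paths.items():
--         if file_name.lower() == 'main.html':
--             return path
--
--     # Priority 2: index.html
--     for file_name, path in file_paths.items():
--         if file_name.lower() == 'index.html':
--             return path
--
--     # Priority 3: Any other HTML file
--     for file_name, path in file_paths.items():
--         if file_name.lower().endswith('.html'):
--             return path
--
--     # Existing logic for other languages
--     for file_name, path in file_paths.items():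
--         if file_name in ['main.py', 'main.cpp', 'main.c']:
--             return path
--
--     for file_name, path in file_paths.items():
--         if file_name.endswith('.py') or file_name.endswith('.cpp') or file_name.endswith('.c'):
--             return path
--
--     return None
-- ===== SOURCE B (Python) =====
-- def get_main_file(file_paths):
--     """
--     Determines the main file to execute based on naming conventions.
--     """
--     def tier(name):
--         low = name.lower()
--         if low == 'main.html':
--             return 1
--         if low == 'index.html':
--             return 2
--         if low.endswith('.html'):
--             return 3
--         if name in ('main.py', 'main.cpp', 'main.c'):
--             return 4
--         if name.endswith('.py') or name.endswith('.cpp') or name.endswith('.c'):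
--             return 5
--         return 6
--
--     best_tier, best_path = 6, None
--     for file_name, path in file_paths.items():
--         t = tier(file_name)
--         if t < best_tier:
--             best_tier, best_path = t, path
--     return best_path
-- ===== Notes on version B (the rewrite author's own statement) =====
-- stated objective: alternative
-- what changed: Replaces A's five sequential full scans of the dict with a single pass that maps each name to a priority tier (1..6) and keeps the first path of the strictly lowest tier seen.
import Mathlib
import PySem

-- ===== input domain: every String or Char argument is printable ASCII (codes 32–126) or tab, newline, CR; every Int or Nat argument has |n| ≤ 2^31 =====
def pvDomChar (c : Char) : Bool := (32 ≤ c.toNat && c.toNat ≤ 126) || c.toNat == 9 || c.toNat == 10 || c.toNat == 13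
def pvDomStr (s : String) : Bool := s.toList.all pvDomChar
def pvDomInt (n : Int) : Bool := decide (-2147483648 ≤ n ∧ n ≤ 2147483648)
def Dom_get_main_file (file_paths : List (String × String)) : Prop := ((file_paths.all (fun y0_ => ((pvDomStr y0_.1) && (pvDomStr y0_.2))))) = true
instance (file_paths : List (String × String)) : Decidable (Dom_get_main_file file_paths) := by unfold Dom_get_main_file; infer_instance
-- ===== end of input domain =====

-- B replaces A's five sequential scans of the dict with a single pass that keeps the
-- first path of the strictly lowest naming-convention tier (objective: alternative).

-- ===== PORT A =====
-- each 'for file_name, path in file_paths.items(): if <cond>: return path' loop of A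
def pvScan (p : String → Bool) : List (String × String) → Option String
  | [] => none
  | x :: rest => if p x.1 then some x.2 else pvScan p rest

-- the five loop conditions of A, in order
def pA1 (n : String) : Bool := PySem.Str.lower n == "main.html"
def pA2 (n : String) : Bool := PySem.Str.lower n == "index.html"
def pA3 (n : String) : Bool := PySem.Str.endswith (PySem.Str.lower n) ".html"
def pA4 (n : String) : Bool := n == "main.py" || n == "main.cpp" || n == "main.c"
def pA5 (n : String) : Bool := PySem.Str.endswith n ".py" || PySem.Str.endswith n ".cpp" || PySem.Str.endswith n ".c"

def get_main_file (file_paths : List (String × String)) : Option String :=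
  match pvScan pA1 file_paths with
  | some path => some path
  | none =>
  match pvScan pA2 file_paths with
  | some path => some path
  | none =>
  match pvScan pA3 file_paths with
  | some path => some path
  | none =>
  match pvScan pA4 file_paths with
  | some path => some path
  | none =>
  match pvScan pA5 file_paths with
  | some path => some path
  | none => none

-- ===== PORT B =====
-- Source B's tier(name): priority tier 1..5, or 6 for files that never match
def pvTier (n : String) : Nat :=
  let low := PySem.Str.lower n
  if low == "main.html" then 1
  else if low == "index.html" then 2
  else if PySem.Str.endswith low ".html" then 3
  else if n == "main.py" || n == "main.cpp" || n == "main.c" then 4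
  else if PySem.Str.endswith n ".py" || PySem.Str.endswith n ".cpp" || PySem.Str.endswith n ".c" then 5
  else 6

-- Source B's single loop: best (tier, path) so far, updated on strictly smaller tier
def get_main_file_alt (file_paths : List (String × String)) : Option String :=
  (file_paths.foldl
    (fun best x => if pvTier x.1 < best.1 then (pvTier x.1, some x.2) else best)
    ((6 : Nat), (none : Option String))).2

-- ===== PRECONDITION & SPEC =====
-- Pre_ excludes association lists whose keys are not pairwise distinct: they do not
-- represent any Python dict (A's parameter is a dict, whose keys are unique).
def Pre_get_main_file (file_paths : List (String × String)) : Prop :=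
  (file_paths.map Prod.fst).Nodup
instance (file_paths : List (String × String)) : Decidable (Pre_get_main_file file_paths) := by unfold Pre_get_main_file; infer_instance

def pvWitness_get_main_file : (List (String × String)) :=
  [("readme.md", "/r"), ("app.py", "/a"), ("Index.HTML", "/i")]

def Spec_get_main_file (file_paths : List (String × String)) (out : Option String) : Prop := out = get_main_file_alt file_paths
instance (file_paths : List (String × String)) (out : Option String) : Decidable (Spec_get_main_file file_paths out) := by unfold Spec_get_main_file; infer_instance

-- ===== CLAIM (what is proved, stated in full; the proofs are below) =====
def Claim_equal_get_main_file : Prop := ∀ (file_paths : List (String × String)), Dom_get_main_file file_paths → Pre_get_main_file file_paths → Spec_get_main_file file_paths (get_main_file file_paths)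

-- ===== LEMMAS AND PROOFS =====

-- minimum tier occurring in the list (6 if none)
def pvMinTier : List (String × String) → Nat
  | [] => 6
  | x :: r => min (pvTier x.1) (pvMinTier r)

theorem pvTier_bounds (n : String) : 1 ≤ pvTier n ∧ pvTier n ≤ 6 := by
  simp only [pvTier]
  split_ifs <;> omega

theorem pA1_tier {n : String} (h : pA1 n = true) : pvTier n ≤ 1 := by
  simp only [pvTier]; unfold pA1 at h; split_ifs
  simp_all

theorem pA2_tier {n : String} (h : pA2 n = true) : pvTier n ≤ 2 := by
  simp only [pvTier]; unfold pA2 at h; split_ifs <;> simp_all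

theorem pA3_tier {n : String} (h : pA3 n = true) : pvTier n ≤ 3 := by
  simp only [pvTier]; unfold pA3 at h; split_ifs <;> simp_all

theorem pA4_tier {n : String} (h : pA4 n = true) : pvTier n ≤ 4 := by
  simp only [pvTier]; unfold pA4 at h; split_ifs <;> simp_all

theorem pA5_tier {n : String} (h : pA5 n = true) : pvTier n ≤ 5 := by
  simp only [pvTier]; unfold pA5 at h; split_ifs <;> simp_all

theorem tier_pA1 {n : String} (h : pvTier n = 1) : pA1 n = true := by
  simp only [pvTier] at h; unfold pA1; split_ifs at h <;> simp_all

theorem tier_pA2 {n : String} (h : pvTier n = 2) : pA2 n = true := by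
  simp only [pvTier] at h; unfold pA2; split_ifs at h <;> simp_all

theorem tier_pA3 {n : String} (h : pvTier n = 3) : pA3 n = true := by
  simp only [pvTier] at h; unfold pA3; split_ifs at h <;> simp_all

theorem tier_pA4 {n : String} (h : pvTier n = 4) : pA4 n = true := by
  simp only [pvTier] at h; unfold pA4; split_ifs at h <;> simp_all

theorem tier_pA5 {n : String} (h : pvTier n = 5) : pA5 n = true := by
  simp only [pvTier] at h; unfold pA5; split_ifs at h <;> simp_all

theorem scan_eq_none {p : String → Bool} {l : List (String × String)} :
    pvScan p l = none ↔ ∀ x ∈ l, p x.1 = false := by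
  induction l with
  | nil => simp [pvScan]
  | cons x r ih =>
    by_cases h : p x.1 = true
    · simp [pvScan, h]
    · simp only [Bool.not_eq_true] at h
      simp [pvScan, h, ih]

theorem scan_congr {p q : String → Bool} {l : List (String × String)}
    (h : ∀ x ∈ l, p x.1 = q x.1) : pvScan p l = pvScan q l := by
  induction l with
  | nil => rfl
  | cons x r ih =>
    have hx := h x (by simp)
    simp only [pvScan, hx]
    split
    · rfl
    · exact ih (fun y hy => h y (by simp [hy]))

theorem minTier_le {l : List (String × String)} {x : String × String} (hx : x ∈ l) :
    pvMinTier l ≤ pvTier x.1 := by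
  induction l with
  | nil => cases hx
  | cons y r ih =>
    rcases List.mem_cons.mp hx with h | h
    · subst h; simp [pvMinTier]
    · exact le_trans (min_le_right _ _) (ih h)

theorem minTier_mem {l : List (String × String)} (h : pvMinTier l < 6) :
    ∃ x ∈ l, pvTier x.1 = pvMinTier l := by
  induction l with
  | nil => simp [pvMinTier] at h
  | cons x r ih =>
    simp only [pvMinTier] at h ⊢
    rcases Nat.lt_or_ge (pvMinTier r) (pvTier x.1) with hlt | hle
    · have hr : pvMinTier r < 6 := by omega
      obtain ⟨y, hy, hty⟩ := ih hr
      exact ⟨y, by simp [hy], by omega⟩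
    · exact ⟨x, by simp, by omega⟩

-- characterization of B's fold
theorem fold_spec (l : List (String × String)) : ∀ (b : Nat) (ob : Option String), b ≤ 6 →
    (l.foldl (fun best x => if pvTier x.1 < best.1 then (pvTier x.1, some x.2) else best) (b, ob)).2
      = if pvMinTier l < b then pvScan (fun n => pvTier n == pvMinTier l) l else ob := by
  induction l with
  | nil =>
    intro b ob hb
    have : ¬ pvMinTier ([] : List (String × String)) < b := by simp [pvMinTier]; omega
    simp [this]
  | cons x r ih =>
    intro b ob hb
    simp only [List.foldl_cons, pvMinTier]
    by_cases ht : pvTier x.1 < b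
    · simp only [ht, if_pos]
      rw [ih _ _ (le_trans (Nat.le_of_lt ht) hb)]
      rcases Nat.lt_or_ge (pvMinTier r) (pvTier x.1) with hlt | hle
      · have h2 : min (pvTier x.1) (pvMinTier r) = pvMinTier r := by omega
        have hne : ¬ (pvTier x.1 == pvMinTier r) = true := by simp; omega
        have hrb : pvMinTier r < b := by omega
        simp [hlt, h2, hrb, pvScan, hne]
      · have h1 : ¬ pvMinTier r < pvTier x.1 := by omega
        have h2 : min (pvTier x.1) (pvMinTier r) = pvTier x.1 := by omega
        simp [h1, h2, ht, pvScan]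
    · simp only [ht, if_false]
      rw [ih _ _ hb]
      rcases Nat.lt_or_ge (pvMinTier r) b with hrb | hrb
      · have h2 : min (pvTier x.1) (pvMinTier r) = pvMinTier r := by omega
        have hne : ¬ (pvTier x.1 == pvMinTier r) = true := by simp; omega
        simp [h2, hrb, pvScan, hne]
      · have h1 : ¬ min (pvTier x.1) (pvMinTier r) < b := by omega
        have h3 : ¬ pvMinTier r < b := by omega
        simp [h3, h1]

theorem alt_spec (l : List (String × String)) :
    get_main_file_alt l
      = if pvMinTier l < 6 then pvScan (fun n => pvTier n == pvMinTier l) l else none := by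
  unfold get_main_file_alt
  exact fold_spec l 6 none (le_refl 6)

-- a loop of A whose tier is strictly above the minimum present finds nothing
theorem scan_none_of_lt {l : List (String × String)} {p : String → Bool} {k : Nat}
    (hp : ∀ n, p n = true → pvTier n ≤ k) (hk : k < pvMinTier l) :
    pvScan p l = none := by
  rw [scan_eq_none]
  intro x hx
  by_contra h
  simp only [Bool.not_eq_false] at h
  have := hp x.1 h
  have := minTier_le hx
  omega

-- the loop at the minimum tier coincides with the tier-equality scan
theorem scan_min {l : List (String × String)} {p : String → Bool} {k : Nat}
    (hp : ∀ n, p n = true → pvTier n ≤ k) (hq : ∀ n, pvTier n = k → p n = true)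
    (hk : pvMinTier l = k) :
    pvScan p l = pvScan (fun n => pvTier n == pvMinTier l) l := by
  apply scan_congr
  intro x hx
  have hle := minTier_le hx
  rw [hk] at hle ⊢
  by_cases h : pvTier x.1 = k
  · simp [hq _ h, h]
  · have : ¬ p x.1 = true := fun hc => h (by have := hp _ hc; omega)
    simp only [Bool.not_eq_true] at this
    simp [this]
    omega

theorem a_spec (l : List (String × String)) :
    get_main_file l
      = if pvMinTier l < 6 then pvScan (fun n => pvTier n == pvMinTier l) l else none := by
  unfold get_main_file
  rcases Nat.lt_or_ge (pvMinTier l) 6 with h6 | h6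
  · have hsome : pvScan (fun n => pvTier n == pvMinTier l) l ≠ none := by
      intro hnone
      rw [scan_eq_none] at hnone
      obtain ⟨x, hx, htx⟩ := minTier_mem h6
      have := hnone x hx
      simp [htx] at this
    have h1 : 1 ≤ pvMinTier l := by
      obtain ⟨x, hx, htx⟩ := minTier_mem h6
      have := (pvTier_bounds x.1).1; omega
    rcases hv : pvScan (fun n => pvTier n == pvMinTier l) l with _ | v
    · exact absurd hv hsome
    have hcase : pvMinTier l = 1 ∨ pvMinTier l = 2 ∨ pvMinTier l = 3 ∨
        pvMinTier l = 4 ∨ pvMinTier l = 5 := by omega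
    rcases hcase with h | h | h | h | h
    · have ek : pvScan pA1 l = pvScan (fun n => pvTier n == pvMinTier l) l := scan_min (fun n => pA1_tier) (fun n => tier_pA1) h
      rw [ek, hv]; simp [h6]
    · have e1 : pvScan pA1 l = none := scan_none_of_lt (fun n => pA1_tier) (by omega)
      have ek : pvScan pA2 l = pvScan (fun n => pvTier n == pvMinTier l) l := scan_min (fun n => pA2_tier) (fun n => tier_pA2) h
      rw [e1, ek, hv]; simp [h6]
    · have e1 : pvScan pA1 l = none := scan_none_of_lt (fun n => pA1_tier) (by omega)
      have e2 : pvScan pA2 l = none := scan_none_of_lt (fun n => pA2_tier) (by omega)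
      have ek : pvScan pA3 l = pvScan (fun n => pvTier n == pvMinTier l) l := scan_min (fun n => pA3_tier) (fun n => tier_pA3) h
      rw [e1, e2, ek, hv]; simp [h6]
    · have e1 : pvScan pA1 l = none := scan_none_of_lt (fun n => pA1_tier) (by omega)
      have e2 : pvScan pA2 l = none := scan_none_of_lt (fun n => pA2_tier) (by omega)
      have e3 : pvScan pA3 l = none := scan_none_of_lt (fun n => pA3_tier) (by omega)
      have ek : pvScan pA4 l = pvScan (fun n => pvTier n == pvMinTier l) l := scan_min (fun n => pA4_tier) (fun n => tier_pA4) h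
      rw [e1, e2, e3, ek, hv]; simp [h6]
    · have e1 : pvScan pA1 l = none := scan_none_of_lt (fun n => pA1_tier) (by omega)
      have e2 : pvScan pA2 l = none := scan_none_of_lt (fun n => pA2_tier) (by omega)
      have e3 : pvScan pA3 l = none := scan_none_of_lt (fun n => pA3_tier) (by omega)
      have e4 : pvScan pA4 l = none := scan_none_of_lt (fun n => pA4_tier) (by omega)
      have ek : pvScan pA5 l = pvScan (fun n => pvTier n == pvMinTier l) l := scan_min (fun n => pA5_tier) (fun n => tier_pA5) h
      rw [e1, e2, e3, e4, ek, hv]; simp [h6]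
  · have h6' : ¬ pvMinTier l < 6 := by omega
    have e1 : pvScan pA1 l = none := scan_none_of_lt (fun n => pA1_tier) (by omega)
    have e2 : pvScan pA2 l = none := scan_none_of_lt (fun n => pA2_tier) (by omega)
    have e3 : pvScan pA3 l = none := scan_none_of_lt (fun n => pA3_tier) (by omega)
    have e4 : pvScan pA4 l = none := scan_none_of_lt (fun n => pA4_tier) (by omega)
    have e5 : pvScan pA5 l = none := scan_none_of_lt (fun n => pA5_tier) (by omega)
    rw [e1, e2, e3, e4, e5]; simp [h6']

-- ===== VERDICT (by name: the statement is the Claim_ definition above) =====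
theorem get_main_file_spec : Claim_equal_get_main_file := by
  intro l _ _
  unfold Spec_get_main_file
  rw [a_spec, alt_spec]
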